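-- pv_equiv track=rewrite | github.com/Joseph-Ano/Machine-Project-Abstract-Machine-Interpreter | utils.py | get_valid_instructions
-- ===== SOURCE A (Python) =====
-- def get_valid_instructions(instructions, curState, input, curInputIdx):
--     valid_instructions = []
--     action = ""
--
--     for instruction in instructions:
--         if curState == instruction[0]:
--             action = instruction[1]
--             break
--
--     if(action == "WRITE" or action == "READ"):
--          for instruction in instructions:
--             if curState == instruction[0]:
--                 valid_instructions.append(instruction)
--
--     else:
--         if(curInputIdx < len(input) and curInputIdx >= 0):
--             for instruction in instructions:
--                 if curState == instruction[0] and input[curInputIdx] == instruction[3]: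
--                     valid_instructions.append(instruction)
--
--     return valid_instructions
-- ===== SOURCE B (Python) =====
-- def get_valid_instructions(instructions, curState, input, curInputIdx):
--     in_range = 0 <= curInputIdx < len(input)
--     sym = input[curInputIdx] if in_range else None
--     action = None
--     state_matches = []
--     symbol_matches = []
--     for ins in instructions:
--         if ins[0] == curState:
--             if action is None:
--                 action = ins[1]
--             state_matches.append(ins)
--             if in_range and len(ins) > 3 and ins[3] == sym:
--                 symbol_matches.append(ins)
--     if action == "WRITE" or action == "READ":
--         return state_matches
--     return symbol_matches if in_range else []
-- ===== Notes on version B (the rewrite author's own statement) =====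
-- stated objective: alternative
-- what changed: B makes a SINGLE pass over the instructions maintaining three accumulators at once (the first match's action, all state matches, and the symbol-refined matches) and only at the end picks which list to return, instead of A's staged find-action loop followed by a second full, branch-dependent scan of all instructions.
-- outside the precondition, e.g. on get_valid_instructions([['q0', 'SCAN'], []], 'q0', [], 0): A returns [], B raises IndexError
import Mathlib
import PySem

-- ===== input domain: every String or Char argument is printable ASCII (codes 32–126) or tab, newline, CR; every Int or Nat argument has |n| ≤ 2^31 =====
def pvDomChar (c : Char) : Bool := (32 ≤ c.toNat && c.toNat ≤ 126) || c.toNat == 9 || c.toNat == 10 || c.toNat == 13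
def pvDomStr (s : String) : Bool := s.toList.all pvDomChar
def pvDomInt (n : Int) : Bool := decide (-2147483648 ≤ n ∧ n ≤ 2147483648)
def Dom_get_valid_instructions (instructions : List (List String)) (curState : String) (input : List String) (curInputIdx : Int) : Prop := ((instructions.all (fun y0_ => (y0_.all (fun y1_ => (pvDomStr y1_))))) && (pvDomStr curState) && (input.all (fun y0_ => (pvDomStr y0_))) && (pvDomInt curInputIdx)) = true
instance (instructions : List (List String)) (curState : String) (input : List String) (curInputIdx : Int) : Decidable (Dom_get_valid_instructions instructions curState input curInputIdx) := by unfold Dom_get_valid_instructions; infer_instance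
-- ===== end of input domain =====

-- B makes one pass over the instructions maintaining three accumulators (first match's action,
-- all state matches, symbol-refined matches) and picks the result at the end, instead of A's
-- staged find-action loop plus a second branch-dependent full scan (objective: alternative).


-- ===== PORT A =====
-- first loop of A: find the action of the first instruction whose field 0 equals curState ("" if none)
def findAction : List (List String) → String → String
  | [], _ => ""
  | ins :: rest, s => if s == ins.getD 0 "" then ins.getD 1 "" else findAction rest s

def get_valid_instructions (instructions : List (List String)) (curState : String) (input : List String) (curInputIdx : Int) : List (List String) :=
  let action := findAction instructions curState
  if action == "WRITE" || action == "READ" then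
    instructions.filter (fun i => curState == i.getD 0 "")
  else
    if curInputIdx < (input.length : Int) ∧ 0 ≤ curInputIdx then
      instructions.filter (fun i =>
        curState == i.getD 0 "" && (PySem.List.pyGet? input curInputIdx).getD "" == i.getD 3 "")
    else []

-- ===== PORT B =====
-- one pass: state = (action found so far : Option String, state matches, symbol matches)
def get_valid_instructions_alt (instructions : List (List String)) (curState : String) (input : List String) (curInputIdx : Int) : List (List String) :=
  let sym : Option String :=
    if 0 ≤ curInputIdx ∧ curInputIdx < (input.length : Int) then PySem.List.pyGet? input curInputIdx else none
  let st := instructions.foldl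
    (fun (acc : Option String × List (List String) × List (List String)) ins =>
      if ins.getD 0 "" == curState then
        (match acc.1 with | none => some (ins.getD 1 "") | some a => some a,
         acc.2.1 ++ [ins],
         if (0 ≤ curInputIdx ∧ curInputIdx < (input.length : Int)) ∧ 3 < (ins.length : Int) ∧
             some (ins.getD 3 "") = sym then
           acc.2.2 ++ [ins]
         else acc.2.2)
      else acc)
    (none, [], [])
  if st.1 = some "WRITE" ∨ st.1 = some "READ" then st.2.1
  else if 0 ≤ curInputIdx ∧ curInputIdx < (input.length : Int) then st.2.2 else []

-- ===== PRECONDITION & SPEC =====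
-- Pre_ excludes exactly the inputs where a missing instruction field makes A or B raise an
-- IndexError: an empty instruction (B's single scan always hits it, while A can return, e.g.
-- after an early break with the input index out of range), a first state-matching instruction
-- without the action field, or — when the action is neither WRITE nor READ and the input index
-- is in range — a state-matching instruction with fewer than 4 fields.
def Pre_get_valid_instructions (instructions : List (List String)) (curState : String) (input : List String) (curInputIdx : Int) : Prop :=
  (∀ i ∈ instructions, i ≠ []) ∧
  (instructions.filter (fun i => i.getD 0 "" == curState) = [] ∨
   (2 ≤ ((instructions.filter (fun i => i.getD 0 "" == curState)).headD []).length ∧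
    (((instructions.filter (fun i => i.getD 0 "" == curState)).headD []).getD 1 "" = "WRITE" ∨
     ((instructions.filter (fun i => i.getD 0 "" == curState)).headD []).getD 1 "" = "READ" ∨
     ¬(0 ≤ curInputIdx ∧ curInputIdx < (input.length : Int)) ∨
     ∀ j ∈ instructions, j.getD 0 "" = curState → 4 ≤ j.length)))
instance (instructions : List (List String)) (curState : String) (input : List String) (curInputIdx : Int) : Decidable (Pre_get_valid_instructions instructions curState input curInputIdx) := by unfold Pre_get_valid_instructions; infer_instance

def pvWitness_get_valid_instructions : List (List String) × String × List String × Int :=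
  ([["q0", "SCAN", "q1", "a"], ["q0", "SCAN", "q2", "b"], ["q1", "WRITE", "q0", "a"]], "q0", ["a", "b"], 0)

def Spec_get_valid_instructions (instructions : List (List String)) (curState : String) (input : List String) (curInputIdx : Int) (out : List (List String)) : Prop := out = get_valid_instructions_alt instructions curState input curInputIdx
instance (instructions : List (List String)) (curState : String) (input : List String) (curInputIdx : Int) (out : List (List String)) : Decidable (Spec_get_valid_instructions instructions curState input curInputIdx out) := by unfold Spec_get_valid_instructions; infer_instance

-- ===== CLAIM (what is proved, stated in full; the proofs are below) =====
def Claim_equal_get_valid_instructions : Prop := ∀ (instructions : List (List String)) (curState : String) (input : List String) (curInputIdx : Int), Dom_get_valid_instructions instructions curState input curInputIdx → Pre_get_valid_instructions instructions curState input curInputIdx → Spec_get_valid_instructions instructions curState input curInputIdx (get_valid_instructions instructions curState input curInputIdx)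

-- ===== LEMMAS AND PROOFS =====

-- B's fold characterised: action = head action of the state-filter (as an Option),
-- state matches = the state-filter, symbol matches = the doubly-filtered list.
theorem foldB_spec (curState : String) (c : Prop) [Decidable c] (sym : Option String)
    (l : List (List String)) (a : Option String) (s y : List (List String)) :
    l.foldl
      (fun (acc : Option String × List (List String) × List (List String)) ins =>
        if ins.getD 0 "" == curState then
          (match acc.1 with | none => some (ins.getD 1 "") | some a => some a,
           acc.2.1 ++ [ins],
           if c ∧ 3 < (ins.length : Int) ∧ some (ins.getD 3 "") = sym then acc.2.2 ++ [ins]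
           else acc.2.2)
        else acc)
      (a, s, y)
    = ((match a with
        | some v => some v
        | none => (l.filter (fun i => i.getD 0 "" == curState)).head?.map (fun m => m.getD 1 "")),
       s ++ l.filter (fun i => i.getD 0 "" == curState),
       y ++ (l.filter (fun i => i.getD 0 "" == curState)).filter
              (fun i => decide (c ∧ 3 < (i.length : Int) ∧ some (i.getD 3 "") = sym))) := by
  induction l generalizing a s y with
  | nil => cases a <;> simp
  | cons i rest ih =>
    by_cases h : (i.getD 0 "" == curState) = true
    · rw [List.foldl_cons, if_pos h, ih]
      simp only [List.filter_cons, h, if_true]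
      by_cases h2 : c ∧ 3 < i.length ∧ some (i[3]?.getD "") = sym
      · obtain ⟨hc, hlen, hsym⟩ := h2
        subst hsym
        cases a <;> simp [hc, hlen, List.append_assoc]
      · cases a <;> simp [h2, List.append_assoc]
    · have h' : ¬ (i.getD 0 "" = curState) := by simpa using h
      rw [List.foldl_cons, if_neg h, ih]
      simp only [List.filter_cons, beq_iff_eq]
      rw [if_neg h']

-- A's action loop computes the action field of the head of the state-matching sublist.
theorem findAction_eq_filter_head (ins : List (List String)) (s : String) :
    findAction ins s =
      match ins.filter (fun i => i.getD 0 "" == s) with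
      | [] => ""
      | m :: _ => m.getD 1 "" := by
  induction ins with
  | nil => rfl
  | cons i rest ih =>
    by_cases h : i[0]?.getD "" = s
    · simp [findAction, List.filter, h]
    · have h' : (i[0]?.getD "" == s) = false := by simp [h]
      simp [findAction, List.filter, Ne.symm h, h', ih]

theorem filter_swap (ins : List (List String)) (s : String) :
    ins.filter (fun i => s == i.getD 0 "") = ins.filter (fun i => i.getD 0 "" == s) := by
  apply List.filter_congr
  intro x _
  exact Bool.beq_comm ..

theorem get_valid_instructions_spec : Claim_equal_get_valid_instructions := by
  intro ins s inp idx _ hpre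
  unfold Spec_get_valid_instructions get_valid_instructions get_valid_instructions_alt
  simp only [foldB_spec, List.nil_append, findAction_eq_filter_head, filter_swap]
  cases hF : List.filter (fun i => i.getD 0 "" == s) ins with
  | nil =>
    have hnone := List.filter_eq_nil_iff.mp hF
    simp
    intro _ _ x hx hxs
    exact absurd hxs.symm (by simpa using hnone x hx)
  | cons m t =>
    simp only [List.head?_cons, Option.map_some]
    by_cases hw : m.getD 1 "" = "WRITE" ∨ m.getD 1 "" = "READ"
    · have hb : (m.getD 1 "" == "WRITE" || m.getD 1 "" == "READ") = true := by simpa using hw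
      have hp : some (m.getD 1 "") = some "WRITE" ∨ some (m.getD 1 "") = some "READ" := by
        simpa using hw
      rw [if_pos hb, if_pos hp]
    · have hb : ¬ ((m.getD 1 "" == "WRITE" || m.getD 1 "" == "READ") = true) := by simpa using hw
      have hp : ¬ (some (m.getD 1 "") = some "WRITE" ∨ some (m.getD 1 "") = some "READ") := by
        simpa using hw
      rw [if_neg hb, if_neg hp]
      by_cases hr : 0 ≤ idx ∧ idx < (inp.length : Int)
      · rw [if_pos ⟨hr.2, hr.1⟩, if_pos hr, ← hF, List.filter_filter]
        obtain ⟨v, hv⟩ : ∃ v, PySem.List.pyGet? inp idx = some v := by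
          rcases hveq : PySem.List.pyGet? inp idx with _ | v
          · have := (PySem.List.pyGet?_eq_none_iff (xs := inp) (i := idx)).mp hveq
            exact absurd (by constructor <;> omega : PySem.Raise.InRange inp.length idx) this
          · exact ⟨v, rfl⟩
        have h4 : ∀ j ∈ ins, j.getD 0 "" = s → 4 ≤ j.length := by
          rcases hpre.2 with h0 | ⟨_, hd⟩
          · rw [h0] at hF
            exact absurd hF (by simp)
          · rcases hd with hW | hR | hnr | h4
            · rw [hF] at hW
              simp only [List.headD_cons] at hW
              exact absurd (Or.inl hW) hw
            · rw [hF] at hR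
              simp only [List.headD_cons] at hR
              exact absurd (Or.inr hR) hw
            · exact absurd hr hnr
            · exact h4
        apply List.filter_congr
        intro x hx
        by_cases hx0 : x.getD 0 "" = s
        · have hlen : (3 : Int) < (x.length : Int) := by
            have := h4 x hx hx0
            omega
          simp [hr, hlen, Bool.and_comm, Bool.beq_comm, Bool.beq_eq_decide_eq, eq_comm]
        · have hb2 : ((x[0]?.getD "" == s) = false) := beq_eq_false_iff_ne.mpr hx0
          have hb1 : ((s == x[0]?.getD "") = false) := beq_eq_false_iff_ne.mpr (Ne.symm hx0)
          simp [hb1, hb2]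
      · rw [if_neg (fun h => hr ⟨h.2, h.1⟩), if_neg hr]
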